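-- pv_equiv track=rewrite | github.com/EliPreston/Python-Mini-Projects | Python Problems 109/problems.py | colour_trio
-- ===== SOURCE A (Python) =====
-- def colour_trio(colours):
--
--     colourList = ['r', 'y', 'b']
--
--     def combineColours(substr, colourList):
--         if substr[0] == substr[1]:
--             return substr[0]
--         else:
--             for colour in colourList:
--                 if not(colour in substr):
--                     return colour
--
--     while len(colours) > 1:
--
--         intermediateColours = ''
--         for i in range(1, len(colours)):
--             current = colours[i-1:i+1]
--             intermediateColours += combineColours(current, colourList)
--         colours = intermediateColours
--
--     return colours
-- ===== SOURCE B (Python) =====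
-- # B: instead of repeatedly rewriting the whole string pass by pass, sweep the input once
-- # left to right, maintaining the anti-diagonal of the reduction triangle that ends at the
-- # current character: diag[k] is the reduced colour of the window ending here of length k+1.
-- # No intermediate strings are built and only O(n) memory is used.
--
-- def _missing(a, b):
--     # first of 'r','y','b' that is neither a nor b
--     return 'ryb'.replace(a, '').replace(b, '')[0]
--
-- def colour_trio(colours):
--     if not colours:
--         return colours
--     diag = []
--     for ch in colours:
--         new_diag = [ch]
--         for v in diag:
--             last = new_diag[-1]
--             new_diag.append(v if v == last else _missing(v, last))
--         diag = new_diag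
--     return diag[-1]
-- ===== Notes on version B (the rewrite author's own statement) =====
-- stated objective: alternative
-- what changed: A repeatedly rewrites the whole string pass by pass until one character is left; B makes a single left-to-right sweep keeping only the anti-diagonal of the reduction triangle (the reduced colour of every window ending at the current character), building no intermediate strings.
import Mathlib
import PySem

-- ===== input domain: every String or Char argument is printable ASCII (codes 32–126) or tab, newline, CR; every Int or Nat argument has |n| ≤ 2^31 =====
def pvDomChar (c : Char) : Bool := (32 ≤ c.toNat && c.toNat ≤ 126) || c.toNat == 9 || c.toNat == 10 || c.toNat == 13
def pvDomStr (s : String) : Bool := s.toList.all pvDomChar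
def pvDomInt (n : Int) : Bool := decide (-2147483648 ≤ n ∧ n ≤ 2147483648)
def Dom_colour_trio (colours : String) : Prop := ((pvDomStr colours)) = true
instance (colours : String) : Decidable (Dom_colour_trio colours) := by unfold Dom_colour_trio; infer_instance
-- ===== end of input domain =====

-- B replaces A's repeated whole-string rewriting passes by one left-to-right sweep that
-- maintains the anti-diagonal of the reduction triangle (no intermediate strings, O(n) memory).

-- ===== PORT A =====
-- combineColours(substr, colourList); substr always has length 2 where it is called,
-- so the pyGetD defaults and the trailing .getD (Python's implicit None) are never reached
def ctCombine (substr : List Char) (colourList : List Char) : Char :=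
  if PySem.List.pyGetD substr 0 ' ' == PySem.List.pyGetD substr 1 ' ' then
    PySem.List.pyGetD substr 0 ' '
  else
    (colourList.find? (fun colour => !(substr.contains colour))).getD ' '

-- one execution of the body of A's while loop (the for-loop building intermediateColours)
def ctPass (colours : List Char) : List Char :=
  (PySem.List.pyRange 1 (colours.length : Int) 1).foldl
    (fun acc i => acc ++ [ctCombine (PySem.List.slice colours (some (i - 1)) (some (i + 1))) ['r', 'y', 'b']]) []

-- needed for termination of the while loop below
theorem ctPass_length (colours : List Char) : (ctPass colours).length = colours.length - 1 := by
  unfold ctPass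
  rw [PySem.List.foldl_append_singleton_eq_map]
  simp [PySem.List.length_pyRange_one]

def ctLoop (colours : List Char) : List Char :=
  if _h : colours.length > 1 then ctLoop (ctPass colours) else colours
termination_by colours.length
decreasing_by simp only [ctPass_length]; omega

def colour_trio (colours : String) : String := String.ofList (ctLoop colours.toList)

-- ===== PORT B =====
-- _missing(a, b): [c for c in 'ryb' if c != a and c != b][0]; the list is never empty
-- (two chars cannot cover three colours), so the pyGetD default is never reached
def ctMissing (a b : Char) : Char :=
  PySem.List.pyGetD ((['r', 'y', 'b'] : List Char).filter (fun c => !(c == a) && !(c == b))) 0 ' '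

def colour_trio_alt (colours : String) : String :=
  if colours.toList.isEmpty then colours
  else
    let diag := colours.toList.foldl (fun diag ch =>
      diag.foldl (fun nd v =>
        let last := PySem.List.pyGetD nd (-1) ' '
        nd ++ [if v == last then v else ctMissing v last]) [ch]) []
    String.ofList [PySem.List.pyGetD diag (-1) ' ']

-- ===== PRECONDITION & SPEC =====
def Spec_colour_trio (colours : String) (out : String) : Prop := out = colour_trio_alt colours
instance (colours : String) (out : String) : Decidable (Spec_colour_trio colours out) := by
  unfold Spec_colour_trio; infer_instance

-- ===== CLAIM (what is proved, stated in full; the proofs are below) =====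
def Claim_equal_colour_trio : Prop := ∀ (colours : String), Dom_colour_trio colours →
  Spec_colour_trio colours (colour_trio colours)

-- ===== LEMMAS AND PROOFS =====

-- last element of a row (with default), and the last element of the k-th reduction row
def ctLast (l : List Char) : Char := l.getD (l.length - 1) ' '
def ctRowLast (l : List Char) (k : ℕ) : Char := ctLast (ctPass^[k] l)

theorem ctLast_append (l : List Char) (x : Char) : ctLast (l ++ [x]) = x := by
  unfold ctLast
  rw [List.getD_eq_getElem _ _ (by simp)]
  simp

theorem ctLast_map_range (f : ℕ → Char) (n : ℕ) (hn : 0 < n) :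
    ctLast ((List.range n).map f) = f (n - 1) := by
  unfold ctLast
  rw [List.getD_eq_getElem _ _ (by simp; omega)]
  simp [List.getElem_map, List.getElem_range]

theorem ctPyLast (l : List Char) (h : l ≠ []) : PySem.List.pyGetD l (-1) ' ' = ctLast l := by
  rw [PySem.List.pyGetD_neg_one (h := h)]
  unfold ctLast
  rw [List.getD_eq_getElem _ _ (by have := List.length_pos_iff.mpr h; omega)]
  rw [List.getLast_eq_getElem]

-- A's pass, element by element
theorem ctSlice_two (l : List Char) (k : ℕ) (hk : k + 1 < l.length) :
    PySem.List.slice l (some ((1 : Int) + k - 1)) (some ((1 : Int) + k + 1)) =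
      [l[k], l[k + 1]] := by
  have h1 : ((1 : Int) + k - 1) = ((k : ℕ) : Int) := by omega
  have h2 : ((1 : Int) + k + 1) = ((k : ℕ) : Int) + ((2 : ℕ) : Int) := by push_cast; omega
  rw [h1, h2, PySem.List.slice_natCast_add l k 2]
  rw [List.drop_eq_getElem_cons (by omega : k < l.length),
      List.drop_eq_getElem_cons (by omega : k + 1 < l.length)]
  rfl

theorem ctPass_eq (l : List Char) :
    ctPass l = (List.range (l.length - 1)).map
      (fun k => ctCombine [l.getD k ' ', l.getD (k + 1) ' '] ['r', 'y', 'b']) := by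
  unfold ctPass
  rw [PySem.List.foldl_append_singleton_eq_map, PySem.List.pyRange_one, List.map_map]
  simp only [List.nil_append]
  have hn : ((l.length : Int) - 1).toNat = l.length - 1 := by omega
  rw [hn]
  apply List.map_congr_left
  intro k hk
  have hk' : k + 1 < l.length := by
    have := List.mem_range.mp hk; omega
  simp only [Function.comp_apply]
  rw [ctSlice_two l k hk',
      List.getD_eq_getElem l ' ' (by omega), List.getD_eq_getElem l ' ' hk']

-- B's inline combine is A's combineColours on the two-char window
theorem comb_eq (a b : Char) :
    (if a == b then a else ctMissing a b) = ctCombine [a, b] ['r', 'y', 'b'] := by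
  by_cases hab : a = b
  · subst hab
    simp [ctCombine, PySem.List.pyGetD]
  · rw [if_neg (by simpa using hab)]
    unfold ctCombine ctMissing
    rw [if_neg (by simpa [PySem.List.pyGetD] using hab)]
    simp only [List.find?, List.filter, List.contains_cons, List.contains_nil, Bool.or_false]
    repeat' split
    all_goals first
      | decide
      | simp_all [PySem.List.pyGetD]

theorem ctPass_append (xs : List Char) (ch : Char) (h : xs ≠ []) :
    ctPass (xs ++ [ch]) = ctPass xs ++ [ctCombine [ctLast xs, ch] ['r', 'y', 'b']] := by
  have hm : 1 ≤ xs.length := List.length_pos_iff.mpr h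
  rw [ctPass_eq, ctPass_eq]
  simp only [List.length_append, List.length_singleton]
  have h1 : xs.length + 1 - 1 = (xs.length - 1) + 1 := by omega
  rw [h1, List.range_succ, List.map_append]
  congr 1
  · apply List.map_congr_left
    intro k hk
    have hk' : k < xs.length - 1 := List.mem_range.mp hk
    rw [List.getD_append _ _ _ _ (by omega), List.getD_append _ _ _ _ (by omega)]
  · simp only [List.map_cons, List.map_nil]
    congr 3
    · rw [List.getD_append _ _ _ _ (by omega)]
      rfl
    · have h2 : xs.length - 1 + 1 = xs.length := by omega
      rw [h2, List.getD_eq_getElem _ _ (by simp)]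
      simp

theorem ctPassIter_length (k : ℕ) (l : List Char) :
    (ctPass^[k] l).length = l.length - k := by
  induction k generalizing l with
  | zero => simp
  | succ k ih =>
    rw [Function.iterate_succ_apply', ctPass_length, ih]
    omega

-- appending one char only appends one cell to each reduction row
theorem ctPassIter_append (k : ℕ) (xs : List Char) (ch : Char) (hk : k < xs.length) :
    ctPass^[k] (xs ++ [ch]) = ctPass^[k] xs ++ [ctRowLast (xs ++ [ch]) k] := by
  induction k generalizing xs with
  | zero =>
    simp only [Function.iterate_zero, id_eq, ctRowLast, ctLast_append]
  | succ k ih =>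
    have hk' : k < xs.length := by omega
    have hne : ctPass^[k] xs ≠ [] := by
      have := ctPassIter_length k xs
      intro hcon
      rw [hcon] at this
      simp at this
      omega
    rw [Function.iterate_succ_apply', Function.iterate_succ_apply', ih xs hk',
        ctPass_append _ _ hne]
    congr 1
    simp only [ctRowLast, Function.iterate_succ_apply']
    rw [ih xs hk', ctPass_append _ _ hne, ctLast_append, ctLast_append]

-- the diagonal recurrence B uses
theorem ctRowLast_succ (k : ℕ) (xs : List Char) (ch : Char) (hk : k < xs.length) :
    ctRowLast (xs ++ [ch]) (k + 1)
      = ctCombine [ctRowLast xs k, ctRowLast (xs ++ [ch]) k] ['r', 'y', 'b'] := by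
  have hne : ctPass^[k] xs ≠ [] := by
    have := ctPassIter_length k xs
    intro hcon
    rw [hcon] at this
    simp at this
    omega
  rw [ctRowLast, Function.iterate_succ_apply', ctPassIter_append k xs ch hk,
      ctPass_append _ _ hne, ctLast_append]
  simp [ctRowLast]

-- B's inner loop extends the diagonal
theorem ctInner (xs : List Char) (ch : Char) : ∀ (m : ℕ), m ≤ xs.length →
    ((List.range m).map (fun k => ctRowLast xs k)).foldl (fun nd v =>
        let last := PySem.List.pyGetD nd (-1) ' '
        nd ++ [if v == last then v else ctMissing v last]) [ch]
      = (List.range (m + 1)).map (fun k => ctRowLast (xs ++ [ch]) k) := by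
  intro m
  induction m with
  | zero =>
    intro _
    simp [ctRowLast, ctLast_append]
  | succ m ih =>
    intro hm
    have hm' : m ≤ xs.length := by omega
    rw [List.range_succ, List.map_append, List.foldl_append, ih hm']
    simp only [List.map_cons, List.map_nil, List.foldl_cons, List.foldl_nil]
    have hne : (List.range (m + 1)).map (fun k => ctRowLast (xs ++ [ch]) k) ≠ [] := by
      simp
    rw [ctPyLast _ hne, ctLast_map_range _ _ (by omega)]
    simp only [Nat.add_sub_cancel]
    rw [comb_eq, ← ctRowLast_succ m xs ch (by omega)]
    rw [List.range_succ (n := m + 1), List.map_append, List.range_succ (n := m), List.map_append]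
    simp

-- B's outer loop invariant
theorem ctOuter (xs : List Char) : xs = [] ∨
    xs.foldl (fun diag ch =>
      diag.foldl (fun nd v =>
        let last := PySem.List.pyGetD nd (-1) ' '
        nd ++ [if v == last then v else ctMissing v last]) [ch]) []
      = (List.range xs.length).map (fun k => ctRowLast xs k) := by
  induction xs using List.reverseRecOn with
  | nil => exact Or.inl rfl
  | append_singleton xs ch ih =>
    right
    rw [List.foldl_append, List.foldl_cons, List.foldl_nil]
    rcases ih with rfl | ih
    · simp [ctRowLast, ctLast]
    · rw [ih, ctInner xs ch xs.length le_rfl]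
      simp

-- A's while loop is the iterated pass
theorem ctLoop_eq_iter (l : List Char) : ctLoop l = ctPass^[l.length - 1] l := by
  by_cases h : l.length > 1
  · rw [ctLoop, dif_pos h]
    have := ctLoop_eq_iter (ctPass l)
    rw [this, ctPass_length]
    rw [← Function.iterate_succ_apply]
    congr 1
    omega
  · rw [ctLoop, dif_neg h]
    have : l.length - 1 = 0 := by omega
    rw [this]
    rfl
termination_by l.length
decreasing_by simp only [ctPass_length]; omega

theorem ctLoop_singleton (l : List Char) (h : l ≠ []) :
    ctLoop l = [ctRowLast l (l.length - 1)] := by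
  have h1 : 1 ≤ l.length := List.length_pos_iff.mpr h
  have hlen : (ctPass^[l.length - 1] l).length = 1 := by
    rw [ctPassIter_length]
    omega
  rw [ctLoop_eq_iter]
  rcases hx : ctPass^[l.length - 1] l with _ | ⟨x, t⟩
  · rw [hx] at hlen; simp at hlen
  · rcases t with _ | _
    · rw [ctRowLast, ctLast, hx]
      rfl
    · rw [hx] at hlen; simp at hlen

-- ===== VERDICT (by name: the statement is the Claim_ definition above) =====
theorem colour_trio_spec : Claim_equal_colour_trio := by
  intro colours _hdom
  unfold Spec_colour_trio colour_trio colour_trio_alt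
  by_cases h0 : colours.toList = []
  · rw [if_pos (by simp [h0]), ctLoop]
    rw [dif_neg (by simp [h0])]
    have hc : colours = "" := by
      rw [← String.ofList_toList (s := colours), h0]
    rw [h0, hc]
  · rw [if_neg (by simp [h0])]
    rcases ctOuter colours.toList with h | h
    · exact absurd h h0
    · simp only [h]
      rw [ctLoop_singleton _ h0]
      rw [ctPyLast _ (by
        simp only [ne_eq, List.map_eq_nil_iff, List.range_eq_nil]
        have : colours.toList.length ≠ 0 := by simpa [List.length_eq_zero_iff] using h0
        omega)]
      rw [ctLast_map_range _ _ (by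
        have : colours.toList.length ≠ 0 := by simpa [List.length_eq_zero_iff] using h0
        omega)]
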